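-- pv_equiv track=rewrite | github.com/sn0rkmaiden/ambik_evaluation | utils/parsing.py | _balance_closers
-- ===== SOURCE A (Python) =====
-- def _balance_closers(s: str) -> str:
--     """Append missing ] or } at the end if counts don't match (string-aware)."""
--     in_str = False
--     esc = False
--     braces = brackets = 0
--     for ch in s:
--         if ch == '"' and not esc:
--             in_str = not in_str
--         esc = (ch == '\\' and not esc) if in_str else False
--         if in_str:
--             continue
--         if ch == '{': braces += 1
--         elif ch == '}': braces -= 1 if braces > 0 else 0
--         elif ch == '[': brackets += 1
--         elif ch == ']': brackets -= 1 if brackets > 0 else 0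
--
--     s = s.rstrip()
--     if brackets > 0:
--         s += ']' * brackets
--     if braces > 0:
--         s += '}' * braces
--     return s
-- ===== SOURCE B (Python) =====
-- def _balance_closers(s: str) -> str:
--     """Append missing ] or } at the end if counts don't match (string-aware)."""
--     # Index-based tokenizer: string literals are skipped wholesale (a backslash
--     # skips the next char), so no in_str/esc flags are needed; structural
--     # brackets are recorded as +1/-1 deltas per kind.
--     d_braces = []
--     d_brackets = []
--     i, n = 0, len(s)
--     while i < n:
--         ch = s[i]
--         if ch == '"':
--             i += 1
--             while i < n:
--                 if s[i] == '\\':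
--                     i += 2
--                 elif s[i] == '"':
--                     i += 1
--                     break
--                 else:
--                     i += 1
--         else:
--             if ch == '{':
--                 d_braces.append(1)
--             elif ch == '}':
--                 d_braces.append(-1)
--             elif ch == '[':
--                 d_brackets.append(1)
--             elif ch == ']':
--                 d_brackets.append(-1)
--             i += 1
--
--     def deficit(deltas):
--         # missing closers = maximum suffix sum of the deltas (>= 0),
--         # computed Kadane-style over the reversed list
--         run = best = 0
--         for d in reversed(deltas):
--             run += d
--             if run > best:
--                 best = run
--         return best
--
--     return s.rstrip() + ']' * deficit(d_brackets) + '}' * deficit(d_braces)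
-- ===== Notes on version B (the rewrite author's own statement) =====
-- stated objective: alternative
-- what changed: A's fused scan with in_str/esc boolean flags and two counters clamped at zero is replaced by an index-based tokenizer that skips string literals wholesale (a backslash skips the next character, so no escape flag exists) collecting +1/-1 deltas per bracket kind, and each missing-closer count is then computed as the maximum suffix sum of the deltas via a Kadane-style pass over the reversed delta list instead of clamped counting.
import Mathlib
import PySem

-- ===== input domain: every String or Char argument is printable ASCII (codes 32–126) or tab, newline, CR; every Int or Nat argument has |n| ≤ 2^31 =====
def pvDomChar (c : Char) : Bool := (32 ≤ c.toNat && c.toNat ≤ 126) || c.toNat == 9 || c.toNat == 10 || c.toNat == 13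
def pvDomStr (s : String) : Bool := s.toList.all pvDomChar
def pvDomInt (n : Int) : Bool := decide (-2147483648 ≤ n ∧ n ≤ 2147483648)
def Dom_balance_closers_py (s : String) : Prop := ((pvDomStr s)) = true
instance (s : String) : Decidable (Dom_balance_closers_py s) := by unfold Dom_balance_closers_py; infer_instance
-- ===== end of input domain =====

-- B replaces A's fused flag-state scan with an index/skip tokenizer (string literals
-- skipped wholesale, no esc flag) plus a maximum-suffix-sum (Kadane) deficit count;
-- objective: alternative structure, same cost.

-- ===== PORT A =====
-- one fused pass: state (esc, in_str, braces, brackets)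
def bcAStep (st : Bool × Bool × Int × Int) (ch : Char) : Bool × Bool × Int × Int :=
  let in_str := if ch == '"' && !st.1 then !st.2.1 else st.2.1
  let esc := if in_str then (ch == '\\' && !st.1) else false
  if in_str then (esc, in_str, st.2.2.1, st.2.2.2)
  else if ch == '{' then (esc, in_str, st.2.2.1 + 1, st.2.2.2)
  else if ch == '}' then (esc, in_str, st.2.2.1 - (if st.2.2.1 > 0 then 1 else 0), st.2.2.2)
  else if ch == '[' then (esc, in_str, st.2.2.1, st.2.2.2 + 1)
  else if ch == ']' then (esc, in_str, st.2.2.1, st.2.2.2 - (if st.2.2.2 > 0 then 1 else 0))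
  else (esc, in_str, st.2.2.1, st.2.2.2)

def balance_closers_py (s : String) : String :=
  let st := s.toList.foldl bcAStep (false, false, 0, 0)
  let braces := st.2.2.1
  let brackets := st.2.2.2
  let s1 := PySem.Str.rstrip s
  let s2 := if brackets > 0 then s1 ++ String.ofList (List.replicate brackets.toNat ']') else s1
  if braces > 0 then s2 ++ String.ofList (List.replicate braces.toNat '}') else s2

-- ===== PORT B =====
-- the inner while loop of Source B: skip a string literal body ('\' skips the next char)
def bSkip : List Char → List Char
  | [] => []
  | c :: t => if c == '\\' then bSkip (t.drop 1) else if c == '"' then t else bSkip t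
  termination_by l => l.length
  decreasing_by
    · simp only [List.length_drop, List.length_cons]; omega
    · simp only [List.length_cons]; omega

lemma bSkip_length : ∀ (l : List Char), (bSkip l).length ≤ l.length := by
  intro l
  fun_induction bSkip l with
  | case1 => simp
  | case2 c t h ih =>
    calc (bSkip (List.drop 1 t)).length ≤ (List.drop 1 t).length := ih
      _ ≤ (c :: t).length := by simp only [List.length_drop, List.length_cons]; omega
  | case3 c t h1 h2 => simp
  | case4 c t h1 h2 ih =>
    calc (bSkip t).length ≤ t.length := ih
      _ ≤ (c :: t).length := by simp

-- the outer while loop of Source B: collect +1/-1 deltas (braces list, brackets list)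
def bScan : List Char → List Int × List Int
  | [] => ([], [])
  | ch :: t =>
    if ch == '"' then bScan (bSkip t)
    else
      let r := bScan t
      if ch == '{' then (1 :: r.1, r.2)
      else if ch == '}' then (-1 :: r.1, r.2)
      else if ch == '[' then (r.1, 1 :: r.2)
      else if ch == ']' then (r.1, -1 :: r.2)
      else r
  termination_by l => l.length
  decreasing_by
    · calc (bSkip t).length ≤ t.length := bSkip_length t
        _ < (ch :: t).length := by simp
    · simp

-- Source B's deficit(): Kadane-style pass over the reversed delta list
def bDeficit (deltas : List Int) : Int :=
  (deltas.reverse.foldl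
    (fun rb d => (rb.1 + d, if rb.1 + d > rb.2 then rb.1 + d else rb.2)) (0, 0)).2

def balance_closers_py_alt (s : String) : String :=
  let ds := bScan s.toList
  PySem.Str.rstrip s ++ String.ofList (List.replicate (bDeficit ds.2).toNat ']')
    ++ String.ofList (List.replicate (bDeficit ds.1).toNat '}')

-- ===== PRECONDITION & SPEC =====
def Spec_balance_closers_py (s : String) (out : String) : Prop := out = balance_closers_py_alt s
instance (s : String) (out : String) : Decidable (Spec_balance_closers_py s out) := by unfold Spec_balance_closers_py; infer_instance

-- ===== CLAIM (what is proved, stated in full; the proofs are below) =====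
def Claim_equal_balance_closers_py : Prop := ∀ (s : String), Dom_balance_closers_py s → Spec_balance_closers_py s (balance_closers_py s)

-- ===== LEMMAS AND PROOFS =====

-- equation lemmas for the well-founded definitions
lemma bSkip_nil0 : bSkip [] = [] := by rw [bSkip.eq_def]

lemma bSkip_cons0 (c : Char) (t : List Char) :
    bSkip (c :: t) = if c == '\\' then bSkip (t.drop 1) else if c == '"' then t else bSkip t := by
  rw [bSkip.eq_def]

lemma bScan_nil : bScan [] = ([], []) := by rw [bScan.eq_def]

lemma bScan_cons (ch : Char) (t : List Char) :
    bScan (ch :: t) =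
      if ch == '"' then bScan (bSkip t)
      else
        let r := bScan t
        if ch == '{' then (1 :: r.1, r.2)
        else if ch == '}' then (-1 :: r.1, r.2)
        else if ch == '[' then (r.1, 1 :: r.2)
        else if ch == ']' then (r.1, -1 :: r.2)
        else r := by
  rw [bScan.eq_def]

-- maximum suffix sum (clamped at 0), the invariant of both deficit computations
def Dmax : List Int → Int
  | [] => 0
  | d :: t => max (Dmax t) (d + t.sum)

lemma Dmax_ge_sum : ∀ (l : List Int), l.sum ≤ Dmax l := by
  intro l; induction l with
  | nil => simp [Dmax]
  | cons d t ih => simp only [Dmax, List.sum_cons]; omega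

lemma Dmax_nonneg : ∀ (l : List Int), 0 ≤ Dmax l := by
  intro l; induction l with
  | nil => simp [Dmax]
  | cons d t ih => simp only [Dmax]; omega

-- B's Kadane fold computes (sum, Dmax)
lemma kadane (l : List Int) :
    l.reverse.foldl (fun rb d => (rb.1 + d, if rb.1 + d > rb.2 then rb.1 + d else rb.2)) (0, 0)
      = (l.sum, Dmax l) := by
  induction l with
  | nil => simp [Dmax]
  | cons d t ih =>
    rw [List.reverse_cons, List.foldl_append, ih]
    simp only [List.foldl_cons, List.foldl_nil, Dmax, List.sum_cons, Prod.mk.injEq]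
    exact ⟨by omega, by split_ifs <;> omega⟩

lemma bDeficit_eq (l : List Int) : bDeficit l = Dmax l := by
  unfold bDeficit; rw [kadane]

-- main invariant: A's fused scan vs B's tokenizer, both modes at once
lemma bc_main (n : Nat) : ∀ (l : List Char), l.length ≤ n →
    (∀ b k : Int, 0 ≤ b → 0 ≤ k →
      (l.foldl bcAStep (false, false, b, k)).2.2
        = (max (b + (bScan l).1.sum) (Dmax (bScan l).1),
           max (k + (bScan l).2.sum) (Dmax (bScan l).2)))
    ∧ (∀ b k : Int,
      (l.foldl bcAStep (false, true, b, k)).2.2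
        = ((bSkip l).foldl bcAStep (false, false, b, k)).2.2) := by
  induction n with
  | zero =>
    intro l hl
    have : l = [] := List.length_eq_zero_iff.mp (Nat.le_zero.mp hl)
    subst this
    constructor
    · intro b k hb hk
      simp only [List.foldl_nil, bScan_nil, List.sum_nil, Dmax, Prod.mk.injEq]
      exact ⟨by omega, by omega⟩
    · intro b k; rw [bSkip_nil0]
      rfl
  | succ n ih =>
    intro l hl
    cases l with
    | nil =>
      constructor
      · intro b k hb hk
        simp only [List.foldl_nil, bScan_nil, List.sum_nil, Dmax, Prod.mk.injEq]
        exact ⟨by omega, by omega⟩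
      · intro b k; rw [bSkip_nil0]
        rfl
    | cons ch t =>
      have ht : t.length ≤ n := by simpa using Nat.lt_succ_iff.mp (by simpa using hl)
      constructor
      · -- outside-string mode
        intro b k hb hk
        by_cases hq : ch = '"'
        · subst hq
          have hstep : bcAStep (false, false, b, k) '"' = (false, true, b, k) := by
            simp [bcAStep]
          have hsk : (bSkip t).length ≤ n := le_trans (bSkip_length t) ht
          rw [List.foldl_cons, hstep, (ih t ht).2 b k,
            (ih (bSkip t) hsk).1 b k hb hk,
            show bScan ('"' :: t) = bScan (bSkip t) from by rw [bScan_cons]; simp]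
        · by_cases c1 : ch = '{'
          · subst c1
            have hstep : bcAStep (false, false, b, k) '{' = (false, false, b + 1, k) := by
              simp [bcAStep]
            rw [List.foldl_cons, hstep, (ih t ht).1 (b + 1) k (by omega) hk,
              show bScan ('{' :: t) = (1 :: (bScan t).1, (bScan t).2) from by
                rw [bScan_cons]; simp]
            simp only [List.sum_cons, Dmax, Prod.mk.injEq]
            exact ⟨by omega, trivial⟩
          · by_cases c2 : ch = '}'
            · subst c2
              have hstep : bcAStep (false, false, b, k) '}'
                  = (false, false, b - (if b > 0 then 1 else 0), k) := by
                simp [bcAStep]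
              rw [List.foldl_cons, hstep,
                (ih t ht).1 (b - (if b > 0 then 1 else 0)) k (by split_ifs <;> omega) hk,
                show bScan ('}' :: t) = (-1 :: (bScan t).1, (bScan t).2) from by
                  rw [bScan_cons]; simp]
              simp only [List.sum_cons, Dmax, Prod.mk.injEq]
              have hg := Dmax_ge_sum (bScan t).1
              exact ⟨by split_ifs <;> omega, trivial⟩
            · by_cases c3 : ch = '['
              · subst c3
                have hstep : bcAStep (false, false, b, k) '[' = (false, false, b, k + 1) := by
                  simp [bcAStep]
                rw [List.foldl_cons, hstep, (ih t ht).1 b (k + 1) hb (by omega),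
                  show bScan ('[' :: t) = ((bScan t).1, 1 :: (bScan t).2) from by
                    rw [bScan_cons]; simp]
                simp only [List.sum_cons, Dmax, Prod.mk.injEq]
                exact ⟨trivial, by omega⟩
              · by_cases c4 : ch = ']'
                · subst c4
                  have hstep : bcAStep (false, false, b, k) ']'
                      = (false, false, b, k - (if k > 0 then 1 else 0)) := by
                    simp [bcAStep]
                  rw [List.foldl_cons, hstep,
                    (ih t ht).1 b (k - (if k > 0 then 1 else 0)) hb (by split_ifs <;> omega),
                    show bScan (']' :: t) = ((bScan t).1, -1 :: (bScan t).2) from by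
                      rw [bScan_cons]; simp]
                  simp only [List.sum_cons, Dmax, Prod.mk.injEq]
                  have hg := Dmax_ge_sum (bScan t).2
                  exact ⟨trivial, by split_ifs <;> omega⟩
                · -- any other char outside a string
                  have hstep : bcAStep (false, false, b, k) ch = (false, false, b, k) := by
                    simp [bcAStep, hq, c1, c2, c3, c4]
                  rw [List.foldl_cons, hstep, (ih t ht).1 b k hb hk,
                    show bScan (ch :: t) = bScan t from by
                      rw [bScan_cons]; simp [hq, c1, c2, c3, c4]]
      · -- inside-string mode (esc = false)
        intro b k
        by_cases hbsl : ch = '\\'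
        · subst hbsl
          have h1 : bcAStep (false, true, b, k) '\\' = (true, true, b, k) := by
            simp [bcAStep]
          rw [show bSkip ('\\' :: t) = bSkip (t.drop 1) from by rw [bSkip_cons0]; simp]
          cases t with
          | nil =>
            rw [List.foldl_cons, h1]
            simp [bSkip_nil0]
          | cons d r =>
            have h2 : bcAStep (true, true, b, k) d = (false, true, b, k) := by
              simp [bcAStep]
            have hr : r.length ≤ n := by
              have := ht; simp only [List.length_cons] at this; omega
            rw [List.foldl_cons, h1, List.foldl_cons, h2, (ih r hr).2 b k]
            simp
        · by_cases hq : ch = '"'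
          · subst hq
            have h1 : bcAStep (false, true, b, k) '"' = (false, false, b, k) := by
              simp [bcAStep]
            rw [List.foldl_cons, h1,
              show bSkip ('"' :: t) = t from by rw [bSkip_cons0]; simp]
          · have h1 : bcAStep (false, true, b, k) ch = (false, true, b, k) := by
              simp [bcAStep, hbsl, hq]
            rw [List.foldl_cons, h1, (ih t ht).2 b k,
              show bSkip (ch :: t) = bSkip t from by rw [bSkip_cons0]; simp [hbsl, hq]]

-- ===== VERDICT (by name: the statement is the Claim_ definition above) =====
theorem balance_closers_py_spec : Claim_equal_balance_closers_py := by
  intro s _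
  unfold Spec_balance_closers_py balance_closers_py balance_closers_py_alt
  simp only []
  have hmain := (bc_main s.toList.length s.toList le_rfl).1 0 0 le_rfl le_rfl
  rw [hmain]
  have hg1 := Dmax_ge_sum (bScan s.toList).1
  have hg2 := Dmax_ge_sum (bScan s.toList).2
  have hn1 := Dmax_nonneg (bScan s.toList).1
  have hn2 := Dmax_nonneg (bScan s.toList).2
  have e1 : max (0 + (bScan s.toList).1.sum) (Dmax (bScan s.toList).1)
      = Dmax (bScan s.toList).1 := by omega
  have e2 : max (0 + (bScan s.toList).2.sum) (Dmax (bScan s.toList).2)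
      = Dmax (bScan s.toList).2 := by omega
  rw [e1, e2, bDeficit_eq, bDeficit_eq]
  have hemp : String.ofList ([] : List Char) = "" := rfl
  by_cases hk : Dmax (bScan s.toList).2 > 0
  · rw [if_pos hk]
    by_cases hb : Dmax (bScan s.toList).1 > 0
    · rw [if_pos hb, String.append_assoc]
    · have hz : Dmax (bScan s.toList).1 = 0 := by omega
      rw [if_neg hb, hz]
      simp [hemp]
  · have hz : Dmax (bScan s.toList).2 = 0 := by omega
    rw [if_neg hk, hz]
    by_cases hb : Dmax (bScan s.toList).1 > 0
    · rw [if_pos hb]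
      simp [hemp]
    · have hz1 : Dmax (bScan s.toList).1 = 0 := by omega
      rw [if_neg hb, hz1]
      simp [hemp]
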